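-- pv_equiv track=rewrite | github.com/a-power/LES_analysis | subfilter.py | find_var
-- ===== SOURCE A (Python) =====
-- def find_var(vdims, var):
--     '''
--     Find dimensions containing strings.
--     Parameters
--     ----------
--     vdims : xarray dimensions
--     var : list of strings
--     Returns
--     -------
--     tuple matching var with either index in vdims or None
--     '''
--
--     index_list = []
--     for v in var :
--         ind = None
--         for i, vdim in enumerate(vdims):
--             if v in vdim:
--                 ind = i
--                 break
--         index_list.append(ind)
--     return tuple(index_list)
-- ===== SOURCE B (Python) =====
-- def find_var(vdims, var):
--     """Single pass over vdims (loop interchange): a slot per var is filled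
--     with the first vdim index whose name contains it; stop once all filled."""
--     result = [None] * len(var)
--     for i, vdim in enumerate(vdims):
--         if all(r is not None for r in result):
--             break
--         for j, v in enumerate(var):
--             if result[j] is None and v in vdim:
--                 result[j] = i
--     return tuple(result)
-- ===== Notes on version B (the rewrite author's own statement) =====
-- stated objective: alternative
-- what changed: Inverts the loop nesting: instead of scanning vdims afresh for each var, B makes one ascending pass over vdims maintaining a slot per var (None until matched), filling each empty slot at its first containing vdim and breaking out early once all slots are filled.
import Mathlib
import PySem

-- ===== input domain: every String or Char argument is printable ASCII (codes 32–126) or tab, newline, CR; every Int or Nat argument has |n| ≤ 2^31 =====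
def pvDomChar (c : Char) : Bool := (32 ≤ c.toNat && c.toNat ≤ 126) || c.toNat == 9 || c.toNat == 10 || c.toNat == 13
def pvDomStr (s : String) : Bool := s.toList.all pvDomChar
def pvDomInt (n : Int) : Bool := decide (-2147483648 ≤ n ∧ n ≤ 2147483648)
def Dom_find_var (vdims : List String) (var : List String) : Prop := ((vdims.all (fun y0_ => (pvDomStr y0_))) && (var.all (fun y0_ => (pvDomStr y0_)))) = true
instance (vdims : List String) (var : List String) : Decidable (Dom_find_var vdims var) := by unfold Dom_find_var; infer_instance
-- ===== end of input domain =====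

-- B inverts the nesting (one ascending pass over vdims filling a slot per var, early break
-- when all slots are filled) instead of A's fresh scan of vdims for each var; same cost,
-- alternative decomposition. Return value only (A returns a tuple, modelled as a list).

-- ===== PORT A =====
-- inner loop: 'for i, vdim in enumerate(vdims): if v in vdim: ind = i; break'
def findA_loop (v : String) : List String → Int → Option Int
  | [], _ => none
  | d :: rest, i => if PySem.Str.isIn v d then some i else findA_loop v rest (i + 1)

def find_var (vdims : List String) (var : List String) : List (Option Int) :=
  var.foldl (fun index_list v => index_list ++ [findA_loop v vdims 0]) []

-- ===== PORT B =====
-- 'for j, v in enumerate(var): if result[j] is None and v in vdim: result[j] = i'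
def stepB (d : String) (i : Int) : List (Option Int) → List String → List (Option Int)
  | [], _ => []
  | s :: ss, [] => s :: ss
  | s :: ss, v :: vs =>
      (match s with
       | some k => some k
       | none => if PySem.Str.isIn v d then some i else none) :: stepB d i ss vs

-- 'for i, vdim in enumerate(vdims): if all(...): break; <inner loop>'
def goB (var : List String) : List String → Int → List (Option Int) → List (Option Int)
  | [], _, slots => slots
  | d :: rest, i, slots =>
      if slots.all Option.isSome then slots
      else goB var rest (i + 1) (stepB d i slots var)

def find_var_alt (vdims : List String) (var : List String) : List (Option Int) :=
  goB var vdims 0 (var.map fun _ => none)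

-- ===== PRECONDITION & SPEC =====
def Spec_find_var (vdims : List String) (var : List String) (out : List (Option Int)) : Prop := out = find_var_alt vdims var
instance (vdims : List String) (var : List String) (out : List (Option Int)) : Decidable (Spec_find_var vdims var out) := by unfold Spec_find_var; infer_instance

-- ===== CLAIM (what is proved, stated in full; the proofs are below) =====
def Claim_equal_find_var : Prop := ∀ (vdims : List String) (var : List String), Dom_find_var vdims var → Spec_find_var vdims var (find_var vdims var)

-- ===== LEMMAS AND PROOFS =====

-- abstract result of B's pass starting at index i with current slots
def mergeSlots (vdims : List String) (i : Int) : List (Option Int) → List String → List (Option Int)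
  | [], _ => []
  | s :: ss, [] => s :: ss
  | s :: ss, v :: vs =>
      (match s with
       | some k => some k
       | none => findA_loop v vdims i) :: mergeSlots vdims i ss vs

theorem mergeSlots_nil (i : Int) : ∀ (slots : List (Option Int)) (var : List String),
    mergeSlots [] i slots var = slots := by
  intro slots
  induction slots with
  | nil => intro var; rfl
  | cons s ss ih =>
      intro var
      cases var with
      | nil => rfl
      | cons v vs =>
          simp only [mergeSlots, ih]
          cases s <;> simp [findA_loop]

theorem mergeSlots_all_some (vdims : List String) (i : Int) :
    ∀ (slots : List (Option Int)) (var : List String),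
    slots.all Option.isSome = true → mergeSlots vdims i slots var = slots := by
  intro slots
  induction slots with
  | nil => intro var _; rfl
  | cons s ss ih =>
      intro var h
      simp only [List.all_cons, Bool.and_eq_true] at h
      cases var with
      | nil => rfl
      | cons v vs =>
          cases s with
          | none => simp at h
          | some k => simp only [mergeSlots, ih vs h.2]

theorem mergeSlots_step (d : String) (rest : List String) (i : Int) :
    ∀ (slots : List (Option Int)) (var : List String),
    mergeSlots rest (i + 1) (stepB d i slots var) var = mergeSlots (d :: rest) i slots var := by
  intro slots
  induction slots with
  | nil => intro var; rfl
  | cons s ss ih =>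
      intro var
      cases var with
      | nil => rfl
      | cons v vs =>
          simp only [stepB, mergeSlots, ih vs]
          cases s with
          | some k => rfl
          | none =>
              by_cases hv : PySem.Chars.isIn v.toList d.toList = true <;>
                simp [findA_loop, PySem.Str.isIn, hv]

theorem goB_eq_mergeSlots : ∀ (vdims var : List String) (i : Int) (slots : List (Option Int)),
    goB var vdims i slots = mergeSlots vdims i slots var := by
  intro vdims
  induction vdims with
  | nil => intro var i slots; simp [goB, mergeSlots_nil]
  | cons d rest ih =>
      intro var i slots
      simp only [goB]
      by_cases h : slots.all Option.isSome
      · rw [if_pos h, mergeSlots_all_some _ _ _ _ h]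
      · rw [if_neg h, ih, mergeSlots_step]

theorem mergeSlots_fresh (vdims : List String) (i : Int) :
    ∀ (var : List String),
    mergeSlots vdims i (var.map fun _ => none) var = var.map (fun v => findA_loop v vdims i) := by
  intro var
  induction var with
  | nil => rfl
  | cons v vs ih => simp only [List.map_cons, mergeSlots, ih]

-- ===== VERDICT (by name: the statement is the Claim_ definition above) =====
theorem find_var_spec : Claim_equal_find_var := by
  intro vdims var _
  unfold Spec_find_var find_var find_var_alt
  rw [PySem.List.foldl_append_singleton_eq_map, goB_eq_mergeSlots, mergeSlots_fresh]
  simp
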